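-- pv_equiv track=rewrite | github.com/7shi/dante-norton | alignment/align_canto.py | consume_matched_text
-- ===== SOURCE A (Python) =====
-- from typing import List, Tuple, Literal
--
-- def consume_matched_text(text: str, matched_words: List[str]) -> str:
--     """
--     Remove continuously matched words from the beginning of text.
--     Stop at first gap.
--     """
--     result = text
--
--     for word in matched_words:
--         result = result.lstrip(" ,;.!?")
--         if result.startswith(word):
--             result = result[len(word):]
--         else:
--             break
--
--     return result.lstrip(" ,;.!?")
-- ===== SOURCE B (Python) =====
-- PUNCT = " ,;.!?"
--
--
-- def _skip_punct(chars):
--     """Drop leading punctuation/space characters from a char list."""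
--     while chars and chars[0] in PUNCT:
--         chars = chars[1:]
--     return chars
--
--
-- def _consume(chars, words):
--     """Recursively consume matching words from a char list."""
--     chars = _skip_punct(chars)
--     if words:
--         w = list(words[0])
--         if chars[:len(w)] == w:
--             return _consume(chars[len(w):], words[1:])
--     return chars
--
--
-- def consume_matched_text(text, matched_words):
--     return "".join(_consume(list(text), matched_words))
-- ===== Notes on version B (the rewrite author's own statement) =====
-- stated objective: alternative
-- what changed: Replaces the string-slicing loop with break (repeated lstrip + startswith + slice on strings) by a recursion over the word list on a character list, using prefix comparison chars[:len(w)] == list(w) and list dropping; no intermediate strings are built until the final join.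
import Mathlib
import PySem

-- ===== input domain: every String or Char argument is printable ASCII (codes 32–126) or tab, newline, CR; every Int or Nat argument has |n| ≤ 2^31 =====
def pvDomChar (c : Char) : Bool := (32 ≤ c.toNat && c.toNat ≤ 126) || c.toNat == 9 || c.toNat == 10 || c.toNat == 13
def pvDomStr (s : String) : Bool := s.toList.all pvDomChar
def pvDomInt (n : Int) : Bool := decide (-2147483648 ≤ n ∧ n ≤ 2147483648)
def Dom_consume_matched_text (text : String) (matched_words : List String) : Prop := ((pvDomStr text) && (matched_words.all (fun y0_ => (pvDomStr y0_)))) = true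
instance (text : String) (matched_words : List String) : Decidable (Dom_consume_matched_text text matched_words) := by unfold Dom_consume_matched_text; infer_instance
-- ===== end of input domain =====

-- B re-implements A as a recursion over the word list on a character list (prefix
-- comparison + drop) instead of A's string-slicing loop with break; alternative, not faster.


-- ===== PORT A =====
-- Python's str.lstrip(" ,;.!?") — char-set lstrip ported by hand: drop leading
-- characters belonging to the set (exact: lstrip removes exactly those).
def pvPunctA : List Char := [' ', ',', ';', '.', '!', '?']

def pvLstripPunct (s : String) : String :=
  String.ofList (s.toList.dropWhile (fun c => pvPunctA.contains c))

-- the for-loop over matched_words with break, carried state = result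
def pvGoA (result : String) (words : List String) : String :=
  match words with
  | [] => pvLstripPunct result
  | word :: rest =>
      let r := pvLstripPunct result
      if PySem.Str.startswith r word then
        pvGoA (PySem.Str.slice r (some (PySem.Str.len word)) none) rest
      else
        pvLstripPunct r  -- break: the final lstrip is applied to r

def consume_matched_text (text : String) (matched_words : List String) : String :=
  pvGoA text matched_words

-- ===== PORT B =====
def pvPunctB : List Char := [' ', ',', ';', '.', '!', '?']

-- _skip_punct: while chars and chars[0] in PUNCT: chars = chars[1:]
def pvSkipPunct (cs : List Char) : List Char :=
  cs.dropWhile (fun c => pvPunctB.contains c)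

-- _consume: recursion over the word list on a char list
def pvConsumeB (cs : List Char) (ws : List String) : List Char :=
  let cs' := pvSkipPunct cs
  match ws with
  | [] => cs'
  | w :: rest =>
      let wl := w.toList
      if cs'.take wl.length = wl then pvConsumeB (cs'.drop wl.length) rest
      else cs'

def consume_matched_text_alt (text : String) (matched_words : List String) : String :=
  String.ofList (pvConsumeB text.toList matched_words)

-- ===== PRECONDITION & SPEC =====
def Spec_consume_matched_text (text : String) (matched_words : List String) (out : String) : Prop := out = consume_matched_text_alt text matched_words
instance (text : String) (matched_words : List String) (out : String) : Decidable (Spec_consume_matched_text text matched_words out) := by unfold Spec_consume_matched_text; infer_instance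

-- ===== CLAIM (what is proved, stated in full; the proofs are below) =====
def Claim_equal_consume_matched_text : Prop := ∀ (text : String) (matched_words : List String), Dom_consume_matched_text text matched_words → Spec_consume_matched_text text matched_words (consume_matched_text text matched_words)

-- ===== LEMMAS AND PROOFS =====

theorem pv_dropWhile_idem {α : Type} (p : α → Bool) (l : List α) :
    (l.dropWhile p).dropWhile p = l.dropWhile p := by
  induction l with
  | nil => rfl
  | cons a t ih =>
      by_cases h : p a = true
      · simp [h, ih]
      · simp [h]

theorem pv_lstrip_toList (s : String) :
    (pvLstripPunct s).toList = pvSkipPunct s.toList := by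
  rw [pvLstripPunct, pvSkipPunct, String.toList_ofList]
  rfl

theorem pv_slice_toList (r w : String) :
    (PySem.Str.slice r (some (PySem.Str.len w)) none).toList = r.toList.drop w.toList.length := by
  rw [PySem.Str.toList_slice, PySem.Chars.slice_eq_listSlice]
  rw [show PySem.Str.len w = ((w.toList.length : Nat) : Int) by
        rw [PySem.Str.len_eq]]
  rw [PySem.List.slice_from_natCast]

theorem pv_go_eq (ws : List String) : ∀ (result : String),
    pvGoA result ws = String.ofList (pvConsumeB result.toList ws) := by
  induction ws with
  | nil =>
      intro result
      show pvLstripPunct result = String.ofList (pvSkipPunct result.toList)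
      rw [pvLstripPunct]; rfl
  | cons w rest ih =>
      intro result
      have hpref : PySem.Str.startswith (pvLstripPunct result) w = true ↔
          (pvSkipPunct result.toList).take w.toList.length = w.toList := by
        rw [PySem.Str.startswith_eq, PySem.Chars.startswith_iff, pv_lstrip_toList]
        constructor
        · intro h; exact (List.prefix_iff_eq_take.mp h).symm
        · intro h; exact List.prefix_iff_eq_take.mpr h.symm
      simp only [pvGoA, pvConsumeB]
      by_cases hc : (pvSkipPunct result.toList).take w.toList.length = w.toList
      · rw [if_pos (hpref.mpr hc), if_pos hc, ih]
        congr 1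
        rw [pv_slice_toList, pv_lstrip_toList]
      · rw [if_neg (fun h => hc (hpref.mp h)), if_neg hc]
        show pvLstripPunct (pvLstripPunct result) = String.ofList (pvSkipPunct result.toList)
        rw [pvLstripPunct, pv_lstrip_toList]
        congr 1
        simp only [pvSkipPunct, pvPunctA, pvPunctB]
        exact pv_dropWhile_idem _ _

-- ===== VERDICT (by name: the statement is the Claim_ definition above) =====
theorem consume_matched_text_spec : Claim_equal_consume_matched_text := by
  intro text matched_words _
  show consume_matched_text text matched_words = consume_matched_text_alt text matched_words
  rw [consume_matched_text, consume_matched_text_alt, pv_go_eq]
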